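-- pv_equiv track=rewrite | github.com/lukaszliniewicz/catlabel | catlabel/printing/runtime/v5x.py | _gray_density_target
-- ===== SOURCE A (Python) =====
-- def _gray_density_target(temperature_c: int, user_density: int, head_type: str) -> int:
--     # Gray-mode thresholds are head-specific lookup tables rather than a
--     # smooth formula.
--     if head_type == "gaoya":
--         thresholds = ((70, 56), (65, 65), (60, 75), (55, 80), (50, 85))
--     else:
--         thresholds = ((70, 56), (65, 60), (60, 65), (55, 75), (50, 80))
--     for threshold, value in thresholds:
--         if temperature_c >= threshold:
--             return min(user_density, value)
--     return user_density
-- ===== SOURCE B (Python) =====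
-- _BREAKS = [50, 55, 60, 65, 70]
-- _VALUES_GAOYA = [85, 80, 75, 65, 56]
-- _VALUES_OTHER = [80, 75, 65, 60, 56]
--
-- def _gray_density_target(temperature_c: int, user_density: int, head_type: str) -> int:
--     # Binary-search the sorted breakpoint list (hand-rolled bisect_right):
--     # lo ends as the number of breakpoints <= temperature_c.
--     lo, hi = 0, len(_BREAKS)
--     while lo < hi:
--         mid = (lo + hi) // 2
--         if temperature_c >= _BREAKS[mid]:
--             lo = mid + 1
--         else:
--             hi = mid
--     if lo == 0:
--         return user_density
--     vals = _VALUES_GAOYA if head_type == "gaoya" else _VALUES_OTHER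
--     return min(user_density, vals[lo - 1])
-- ===== Notes on version B (the rewrite author's own statement) =====
-- stated objective: alternative
-- what changed: Replaces the linear descending scan over (threshold, value) pairs by a hand-rolled bisect_right binary search over an ascending breakpoint list with parallel per-head value lists.
import Mathlib
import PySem

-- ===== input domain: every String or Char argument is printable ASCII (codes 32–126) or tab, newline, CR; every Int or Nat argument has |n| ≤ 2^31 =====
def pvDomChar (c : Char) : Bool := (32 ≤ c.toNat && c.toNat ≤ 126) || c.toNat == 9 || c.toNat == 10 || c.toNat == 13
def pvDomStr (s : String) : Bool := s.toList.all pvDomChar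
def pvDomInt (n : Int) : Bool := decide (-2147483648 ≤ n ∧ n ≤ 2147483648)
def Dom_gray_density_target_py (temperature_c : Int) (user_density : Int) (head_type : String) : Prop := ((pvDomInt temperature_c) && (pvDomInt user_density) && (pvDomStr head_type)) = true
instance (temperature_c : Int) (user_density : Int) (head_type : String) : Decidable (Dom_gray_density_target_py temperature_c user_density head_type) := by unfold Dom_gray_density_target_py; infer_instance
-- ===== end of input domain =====

-- B replaces A's linear descending scan over (threshold, value) pairs by a
-- hand-rolled bisect_right binary search over ascending breakpoints with
-- parallel per-head value lists (alternative structure, same exact values).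

-- ===== PORT A =====
-- the early-returning for-loop over the threshold table
def grayScanA (temperature_c user_density : Int) : List (Int × Int) → Int
  | [] => user_density
  | (threshold, value) :: rest =>
      if temperature_c ≥ threshold then min user_density value
      else grayScanA temperature_c user_density rest

def gray_density_target_py (temperature_c : Int) (user_density : Int) (head_type : String) : Int :=
  let thresholds : List (Int × Int) :=
    if head_type == "gaoya" then [(70, 56), (65, 65), (60, 75), (55, 80), (50, 85)]
    else [(70, 56), (65, 60), (60, 65), (55, 75), (50, 80)]
  grayScanA temperature_c user_density thresholds

-- ===== PORT B =====
def grayBreaks : List Int := [50, 55, 60, 65, 70]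
def grayValsGaoya : List Int := [85, 80, 75, 65, 56]
def grayValsOther : List Int := [80, 75, 65, 60, 56]

-- the hand-rolled bisect_right while-loop of Source B (getD is exact: mid is always in range)
def grayBisect (temperature_c : Int) (lo hi : Nat) : Nat :=
  if _h : lo < hi then
    let mid := (lo + hi) / 2
    if temperature_c ≥ grayBreaks.getD mid 0 then grayBisect temperature_c (mid + 1) hi
    else grayBisect temperature_c lo mid
  else lo
termination_by hi - lo
decreasing_by all_goals omega

def gray_density_target_py_alt (temperature_c : Int) (user_density : Int) (head_type : String) : Int :=
  let lo := grayBisect temperature_c 0 grayBreaks.length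
  if lo = 0 then user_density
  else
    let vals := if head_type == "gaoya" then grayValsGaoya else grayValsOther
    min user_density (vals.getD (lo - 1) 0)

-- ===== PRECONDITION & SPEC =====
def Spec_gray_density_target_py (temperature_c : Int) (user_density : Int) (head_type : String) (out : Int) : Prop := out = gray_density_target_py_alt temperature_c user_density head_type
instance (temperature_c : Int) (user_density : Int) (head_type : String) (out : Int) : Decidable (Spec_gray_density_target_py temperature_c user_density head_type out) := by unfold Spec_gray_density_target_py; infer_instance

-- ===== CLAIM (what is proved, stated in full; the proofs are below) =====
def Claim_equal_gray_density_target_py : Prop := ∀ (temperature_c : Int) (user_density : Int) (head_type : String), Dom_gray_density_target_py temperature_c user_density head_type → Spec_gray_density_target_py temperature_c user_density head_type (gray_density_target_py temperature_c user_density head_type)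

-- ===== LEMMAS AND PROOFS =====

-- ===== VERDICT (by name: the statement is the Claim_ definition above) =====
theorem gray_density_target_py_spec : Claim_equal_gray_density_target_py := by
  intro t u h _
  unfold Spec_gray_density_target_py gray_density_target_py gray_density_target_py_alt
  have hb : grayBisect t 0 grayBreaks.length =
      if t ≥ 70 then 5 else if t ≥ 65 then 4 else if t ≥ 60 then 3
      else if t ≥ 55 then 2 else if t ≥ 50 then 1 else 0 := by
    simp only [grayBreaks, List.length]
    split_ifs with h1 h2 h3 h4 h5 <;>
      repeat
        first
        | rfl
        | (rw [grayBisect]; norm_num [grayBreaks, List.getD];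
           first
           | rw [if_pos (by omega : t ≥ _)]
           | rw [if_neg (by omega : ¬ t ≥ _)]
           | skip)
  rw [hb]
  by_cases hg : (h == "gaoya") = true <;>
    simp only [hg, if_true, if_false, grayScanA, grayValsGaoya, grayValsOther,
      Bool.false_eq_true] <;>
    split_ifs <;> simp_all [List.getD]
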